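-- pv_equiv track=rewrite | github.com/Periklismant/oPIEC | src/oPIEC-python/CAVIARCEDurations.py | dataSeparator
-- ===== SOURCE A (Python) =====
-- def dataSeparator(listofvalues, buckno):
-- 	valrange = listofvalues[-1] - listofvalues[0]
-- 	buckrange = valrange//buckno
-- 	it = 0
-- 	pilot = listofvalues[0]
-- 	buckit=0
-- 	dataBuckets = [[pilot]]
-- 	for it in range(1, len(listofvalues)):
-- 		if listofvalues[it] - pilot < buckrange:
-- 			dataBuckets[buckit].append(listofvalues[it])
-- 		else:
-- 			pilot=listofvalues[it]
-- 			dataBuckets.append([pilot])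
-- 			buckit+=1
-- 		it+=1
-- 	return dataBuckets
-- ===== SOURCE B (Python) =====
-- def dataSeparator(listofvalues, buckno):
--     buckrange = (listofvalues[-1] - listofvalues[0]) // buckno
--     # stage 1: compute the cut positions where a new bucket starts
--     cuts = [0]
--     pilot = listofvalues[0]
--     for i, v in enumerate(listofvalues[1:], 1):
--         if v - pilot >= buckrange:
--             cuts.append(i)
--             pilot = v
--     cuts.append(len(listofvalues))
--     # stage 2: materialise the buckets by slicing between consecutive cuts
--     return [listofvalues[a:b] for a, b in zip(cuts, cuts[1:])]
-- ===== Notes on version B (the rewrite author's own statement) =====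
-- stated objective: alternative
-- what changed: Replaces A's single pass that builds the nested bucket list in place (append at a bucket index, per-element if/else) with a two-stage algorithm: stage 1 scans once collecting only the cut positions where a new bucket starts, stage 2 materialises the buckets by slicing the input between consecutive cut positions (zip of cuts with its tail).
import Mathlib
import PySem

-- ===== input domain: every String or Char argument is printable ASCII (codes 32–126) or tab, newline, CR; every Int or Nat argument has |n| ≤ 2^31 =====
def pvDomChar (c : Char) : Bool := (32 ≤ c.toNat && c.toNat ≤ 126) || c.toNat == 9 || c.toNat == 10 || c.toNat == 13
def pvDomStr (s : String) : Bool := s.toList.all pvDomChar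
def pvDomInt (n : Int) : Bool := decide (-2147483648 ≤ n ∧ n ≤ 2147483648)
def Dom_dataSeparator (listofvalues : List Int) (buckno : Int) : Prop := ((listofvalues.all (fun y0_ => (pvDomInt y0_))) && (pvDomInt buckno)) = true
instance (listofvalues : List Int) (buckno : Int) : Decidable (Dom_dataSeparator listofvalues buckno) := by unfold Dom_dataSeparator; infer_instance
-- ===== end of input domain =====

-- B is a two-stage reformulation: stage 1 computes only the cut positions (indices where a
-- new bucket starts), stage 2 materialises the buckets by slicing between consecutive cuts;
-- A instead builds the nested bucket list element by element. Objective: alternative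
-- decomposition, same cost.

-- ===== PORT A =====
-- flat loop over the elements, state = (dataBuckets, pilot, buckit); A appends at index
-- buckit (List.modify) or starts a new bucket and increments buckit.
def dataSeparator (listofvalues : List Int) (buckno : Int) : List (List Int) :=
  match listofvalues with
  | [] => []          -- Python raises IndexError here (excluded by Pre_)
  | first :: rest =>
    if buckno = 0 then []   -- Python raises ZeroDivisionError here (excluded by Pre_)
    else
      let valrange := PySem.List.pyGetD (first :: rest) (-1) 0 - PySem.List.pyGetD (first :: rest) 0 0
      let buckrange := PySem.Int.floordiv valrange buckno
      (rest.foldl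
        (fun (st : List (List Int) × Int × Nat) v =>
          if v - st.2.1 < buckrange then
            (st.1.modify st.2.2 (fun bk => bk ++ [v]), st.2.1, st.2.2)
          else
            (st.1 ++ [[v]], v, st.2.2 + 1))
        ([[PySem.List.pyGetD (first :: rest) 0 0]], PySem.List.pyGetD (first :: rest) 0 0, 0)).1

-- ===== PORT B =====
-- stage 1: fold over enumerate(listofvalues[1:], 1) collecting cut positions;
-- stage 2: cuts ++ [len], then map a slice over zip(cuts, cuts[1:]).
def dataSeparator_alt (listofvalues : List Int) (buckno : Int) : List (List Int) :=
  match listofvalues with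
  | [] => []          -- Python raises IndexError here (excluded by Pre_)
  | first :: rest =>
    if buckno = 0 then []   -- Python raises ZeroDivisionError here (excluded by Pre_)
    else
      let l := first :: rest
      let buckrange := PySem.Int.floordiv (PySem.List.pyGetD l (-1) 0 - PySem.List.pyGetD l 0 0) buckno
      let st := (PySem.List.enumerate (PySem.List.slice l (some 1) none) 1).foldl
        (fun (st : List Int × Int) (iv : Int × Int) =>
          if iv.2 - st.2 ≥ buckrange then (st.1 ++ [iv.1], iv.2) else st)
        ([0], PySem.List.pyGetD l 0 0)
      let cuts := st.1 ++ [PySem.List.len l]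
      (cuts.zip cuts.tail).map (fun ab => PySem.List.slice l (some ab.1) (some ab.2))

-- ===== PRECONDITION & SPEC =====
-- Pre_ excludes only the inputs where Python A raises: IndexError on the empty list,
-- ZeroDivisionError when buckno == 0.
def Pre_dataSeparator (listofvalues : List Int) (buckno : Int) : Prop :=
  listofvalues ≠ [] ∧ buckno ≠ 0
instance (listofvalues : List Int) (buckno : Int) : Decidable (Pre_dataSeparator listofvalues buckno) := by unfold Pre_dataSeparator; infer_instance

def pvWitness_dataSeparator : List Int × Int := ([1, 2, 5, 9], 2)

def Spec_dataSeparator (listofvalues : List Int) (buckno : Int) (out : List (List Int)) : Prop := out = dataSeparator_alt listofvalues buckno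
instance (listofvalues : List Int) (buckno : Int) (out : List (List Int)) : Decidable (Spec_dataSeparator listofvalues buckno out) := by unfold Spec_dataSeparator; infer_instance

-- ===== CLAIM (what is proved, stated in full; the proofs are below) =====
def Claim_equal_dataSeparator : Prop := ∀ (listofvalues : List Int) (buckno : Int), Dom_dataSeparator listofvalues buckno → Pre_dataSeparator listofvalues buckno → Spec_dataSeparator listofvalues buckno (dataSeparator listofvalues buckno)

-- ===== LEMMAS AND PROOFS =====

-- the buckets cut out of l by a list of cut positions
def slicesOf (l : List Int) : List Int → List (List Int)
  | c0 :: c1 :: cs => PySem.List.slice l (some c0) (some c1) :: slicesOf l (c1 :: cs)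
  | _ => []

theorem zip_map_eq_slicesOf (l : List Int) (cs : List Int) :
    (cs.zip cs.tail).map (fun ab => PySem.List.slice l (some ab.1) (some ab.2))
      = slicesOf l cs := by
  induction cs with
  | nil => simp [slicesOf]
  | cons c0 cs ih =>
    cases cs with
    | nil => simp [slicesOf]
    | cons c1 cs => simpa [slicesOf] using ih

theorem length_slicesOf (l : List Int) (cs : List Int) :
    (slicesOf l cs).length = cs.length - 1 := by
  induction cs with
  | nil => simp [slicesOf]
  | cons c0 cs ih =>
    cases cs with
    | nil => simp [slicesOf]
    | cons c1 cs => simpa [slicesOf] using ih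

theorem slicesOf_snoc (l : List Int) (cs : List Int) (h : cs ≠ []) (j : Int) :
    slicesOf l (cs ++ [j])
      = slicesOf l cs ++ [PySem.List.slice l (some (cs.getLast h)) (some j)] := by
  induction cs with
  | nil => exact absurd rfl h
  | cons c0 cs ih =>
    cases cs with
    | nil => simp [slicesOf]
    | cons c1 cs => simpa [slicesOf] using ih (by simp)

theorem modify_append_singleton {α : Type} (done : List α) (cur : α) (f : α → α) :
    (done ++ [cur]).modify done.length f = done ++ [f cur] := by
  induction done with
  | nil => simp [List.modify]
  | cons d ds ih => simpa [List.modify] using ih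

theorem slice_snoc (l : List Int) (a : Int) (j : Nat)
    (h0 : 0 ≤ a) (haj : a ≤ (j : Int)) (hj : j < l.length) :
    PySem.List.slice l (some a) (some ((j : Int) + 1))
      = PySem.List.slice l (some a) (some (j : Int)) ++ [l[j]] := by
  rw [PySem.List.slice_toNat l h0 (by omega), PySem.List.slice_toNat l h0 (by omega)]
  have hm : a.toNat ≤ j := by omega
  have h1 : ((j : Int) + 1).toNat = j + 1 := by omega
  have h2 : ((j : Int)).toNat = j := by omega
  rw [h1, h2, show j + 1 - a.toNat = (j - a.toNat) + 1 by omega, List.take_add_one]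
  have : (l.drop a.toNat)[j - a.toNat]? = some l[j] := by
    rw [List.getElem?_drop, show a.toNat + (j - a.toNat) = j by omega,
      List.getElem?_eq_getElem hj]
  simp [this]

theorem slice_singleton (l : List Int) (j : Nat) (hj : j < l.length) :
    PySem.List.slice l (some (j : Int)) (some ((j : Int) + 1)) = [l[j]] := by
  rw [slice_snoc l (j : Int) j (by omega) le_rfl hj]
  simp [PySem.List.slice_natCast]

-- the invariant tying A's flat loop (buckets built in place) to B's cut-collecting loop:
-- with cuts collected so far and position i, A's buckets are exactly the slices of
-- cuts ++ [i], and both loops keep this in lock-step.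
theorem inv_foldl (br : Int) (l : List Int) :
    ∀ (rest : List Int) (i : Nat) (cuts : List Int) (pilot : Int)
      (hd : l.drop i = rest) (hlen : i ≤ l.length) (hC : cuts ≠ [])
      (h0 : 0 ≤ cuts.getLast hC) (hle : cuts.getLast hC ≤ (i : Int)),
    (rest.foldl
        (fun (st : List (List Int) × Int × Nat) v =>
          if v - st.2.1 < br then
            (st.1.modify st.2.2 (fun bk => bk ++ [v]), st.2.1, st.2.2)
          else
            (st.1 ++ [[v]], v, st.2.2 + 1))
        (slicesOf l (cuts ++ [(i : Int)]), pilot, cuts.length - 1)).1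
      = slicesOf l
          (((PySem.List.enumerate rest (i : Int)).foldl
              (fun (st : List Int × Int) (iv : Int × Int) =>
                if iv.2 - st.2 ≥ br then (st.1 ++ [iv.1], iv.2) else st)
              (cuts, pilot)).1 ++ [(l.length : Int)]) := by
  intro rest
  induction rest with
  | nil =>
    intro i cuts pilot hd hlen hC h0 hle
    have : i = l.length := by
      have := List.length_drop (l := l) (i := i); rw [hd] at this; simp at this; omega
    subst this
    simp [PySem.List.enumerate]
  | cons v vs ih =>
    intro i cuts pilot hd hlen hC h0 hle
    have hilt : i < l.length := by
      have := List.length_drop (l := l) (i := i); rw [hd] at this; simp at this; omega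
    have hv : l[i]'hilt = v := by
      have : (l.drop i)[0]'(by rw [hd]; simp) = v := by simp [hd]
      simpa using this
    have hd' : l.drop (i + 1) = vs := by
      rw [← List.tail_drop, hd]; rfl
    have henum : PySem.List.enumerate (v :: vs) (i : Int)
        = ((i : Int), v) :: PySem.List.enumerate vs ((i : Int) + 1) := by
      simp [PySem.List.enumerate]
    rw [henum]
    simp only [List.foldl_cons]
    have hcast : ((i : Int) + 1) = ((i + 1 : Nat) : Int) := by push_cast; ring
    by_cases hc : v - pilot < br
    · rw [if_pos hc, if_neg (by omega)]
      have hmod :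
          (slicesOf l (cuts ++ [(i : Int)])).modify (cuts.length - 1) (fun bk => bk ++ [v])
            = slicesOf l (cuts ++ [((i : Int) + 1)]) := by
        rw [slicesOf_snoc l cuts hC, slicesOf_snoc l cuts hC,
          show cuts.length - 1 = (slicesOf l cuts).length by rw [length_slicesOf],
          modify_append_singleton,
          slice_snoc l (cuts.getLast hC) i h0 hle hilt, hv]
      rw [hmod, hcast]
      exact ih (i + 1) cuts pilot hd' (by omega) hC h0 (by push_cast; omega)
    · rw [if_neg hc, if_pos (by omega)]
      have hnew :
          slicesOf l (cuts ++ [(i : Int)]) ++ [[v]]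
            = slicesOf l ((cuts ++ [(i : Int)]) ++ [((i : Int) + 1)]) := by
        rw [slicesOf_snoc l (cuts ++ [(i : Int)]) (by simp),
          List.getLast_concat, slice_singleton l i hilt, hv]
      have hidx : cuts.length - 1 + 1 = (cuts ++ [(i : Int)]).length - 1 := by
        have : cuts.length ≠ 0 := by simpa using hC
        simp; omega
      rw [hnew, hidx, hcast]
      exact ih (i + 1) (cuts ++ [(i : Int)]) v hd' (by omega) (by simp)
        (by rw [List.getLast_concat]; omega)
        (by rw [List.getLast_concat]; push_cast; omega)

theorem dataSeparator_eq (listofvalues : List Int) (buckno : Int)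
    (h : Pre_dataSeparator listofvalues buckno) :
    dataSeparator listofvalues buckno = dataSeparator_alt listofvalues buckno := by
  obtain ⟨hne, hb⟩ := h
  match listofvalues with
  | [] => exact absurd rfl hne
  | first :: rest =>
    simp only [dataSeparator, dataSeparator_alt, if_neg hb]
    rw [zip_map_eq_slicesOf]
    rw [PySem.List.slice_from_one]
    have := inv_foldl
      (PySem.Int.floordiv
        (PySem.List.pyGetD (first :: rest) (-1) 0 - PySem.List.pyGetD (first :: rest) 0 0)
        buckno)
      (first :: rest) rest 1 [0] (PySem.List.pyGetD (first :: rest) 0 0)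
      (by simp) (by simp) (by simp) (by simp) (by simp)
    simp only [List.tail_cons] at this ⊢
    rw [show ((1 : Nat) : Int) = (1 : Int) by norm_num] at this
    rw [show slicesOf (first :: rest) ([0] ++ [(1 : Int)])
          = [[PySem.List.pyGetD (first :: rest) 0 0]] from by
        simp [slicesOf, PySem.List.pyGetD_zero_cons, PySem.List.slice_toNat]] at this
    rw [show ([(0 : Int)]).length - 1 = 0 from by simp] at this
    rw [PySem.List.len_eq]
    exact this

-- ===== VERDICT (by name: the statement is the Claim_ definition above) =====
theorem dataSeparator_spec : Claim_equal_dataSeparator := by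
  intro l b _ hpre
  exact dataSeparator_eq l b hpre
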